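-- pv_equiv track=rewrite | github.com/ibrahimelshahatt/automata_practical_exam_20912021100934 | pda_palindrome.py | accepts
-- ===== SOURCE A (Python) =====
-- def accepts(string):
--     if len(string) % 2 == 0:
--         return False
--
--     stack = []
--     mid = len(string) // 2
--
--     for i in range(mid):
--         stack.append(string[i])
--
--     for i in range(mid + 1, len(string)):
--         if not stack or stack.pop() != string[i]:
--             return False
--
--     return True
-- ===== SOURCE B (Python) =====
-- def accepts(string):
--     return len(string) % 2 == 1 and string == string[::-1]
-- ===== Notes on version B (the rewrite author's own statement) =====
-- stated objective: simpler
-- what changed: Replaces the explicit stack simulation (push first half, pop against second half with early return) by a parity check plus a single whole-string reverse-and-compare.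
import Mathlib
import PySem

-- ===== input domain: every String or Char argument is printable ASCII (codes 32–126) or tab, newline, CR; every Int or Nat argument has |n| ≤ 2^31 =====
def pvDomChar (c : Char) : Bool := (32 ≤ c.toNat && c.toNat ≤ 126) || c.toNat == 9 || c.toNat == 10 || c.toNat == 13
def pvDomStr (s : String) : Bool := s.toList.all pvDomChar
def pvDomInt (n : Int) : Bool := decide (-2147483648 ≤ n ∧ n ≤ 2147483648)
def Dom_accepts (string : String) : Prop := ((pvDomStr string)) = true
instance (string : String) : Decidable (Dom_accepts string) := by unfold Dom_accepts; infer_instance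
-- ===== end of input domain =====

-- B replaces A's stack simulation by a parity check plus one whole-string reverse comparison.

-- ===== PORT A =====
-- 'for i in range(mid+1, len): if not stack or stack.pop() != string[i]: return False'
-- (pop() removes the LAST element; the early return is the 'false' branches)
def acceptsLoop (l : List Char) (stack : List Char) : List Int → Bool
  | [] => true
  | i :: is =>
    match stack.getLast? with
    | none => false                                  -- 'not stack' → return False
    | some c =>
      -- index i is always in range here, so the default of pyGetD is never used
      if c ≠ PySem.List.pyGetD l i ' ' then false
      else acceptsLoop l stack.dropLast is

def accepts (string : String) : Bool :=
  let l := string.toList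
  if (l.length : Int) % 2 == 0 then false
  else
    let mid : Int := PySem.Int.floordiv (l.length : Int) 2
    -- 'for i in range(mid): stack.append(string[i])' (index always in range)
    let stack := (PySem.List.pyRange 0 mid 1).foldl
      (fun st i => st ++ [PySem.List.pyGetD l i ' ']) []
    acceptsLoop l stack (PySem.List.pyRange (mid + 1) (l.length : Int) 1)

-- ===== PORT B =====
-- 'return len(string) % 2 == 1 and string == string[::-1]'
def accepts_alt (string : String) : Bool :=
  let l := string.toList
  ((l.length : Int) % 2 == 1) && (l == l.reverse)

-- ===== PRECONDITION & SPEC =====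
def Spec_accepts (string : String) (out : Bool) : Prop := out = accepts_alt string
instance (string : String) (out : Bool) : Decidable (Spec_accepts string out) := by unfold Spec_accepts; infer_instance

-- ===== CLAIM (what is proved, stated in full; the proofs are below) =====
def Claim_equal_accepts : Prop := ∀ (string : String), Dom_accepts string → Spec_accepts string (accepts string)

-- ===== LEMMAS AND PROOFS =====

-- the second loop tests whether the visited characters form a prefix of the reversed stack
theorem acceptsLoop_eq_isPrefixOf (l : List Char) (stack : List Char) (is : List Int) :
    acceptsLoop l stack is
      = (is.map (fun i => PySem.List.pyGetD l i ' ')).isPrefixOf stack.reverse := by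
  induction is generalizing stack with
  | nil => simp [acceptsLoop]
  | cons i is ih =>
    rcases stack.eq_nil_or_concat with rfl | ⟨ys, c, rfl⟩
    · simp [acceptsLoop]
    · simp only [acceptsLoop, List.map_cons]
      by_cases h : c = PySem.List.pyGetD l i ' '
      · simp [h, ih]
      · have h' := Ne.symm h
        simp [h]
        simp [List.isPrefixOf, h']

-- the first loop builds the first 'mid' characters of l, in order
theorem stack_eq_take (l : List Char) (m : Nat) (hm : m ≤ l.length) :
    (PySem.List.pyRange 0 (m : Int) 1).foldl
        (fun st i => st ++ [PySem.List.pyGetD l i ' ']) []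
      = l.take m := by
  have hmap := PySem.List.foldl_append_singleton_eq_map
      (fun i => PySem.List.pyGetD l i ' ') (PySem.List.pyRange 0 (m : Int) 1) []
  rw [hmap]
  simp only [List.nil_append]
  apply List.ext_getElem
  · simp [PySem.List.length_pyRange_one, hm]
  · intro k hk1 hk2
    have hk : k < m := by
      simpa [PySem.List.length_pyRange_one] using hk1
    rw [List.getElem_map, PySem.List.getElem_pyRange_one]
    rw [List.getElem_take]
    have : (0 : Int) + (k : Int) = ((k : Nat) : Int) := by omega
    rw [this, PySem.List.pyGetD_natCast]
    exact List.getD_eq_getElem l ' ' (by omega)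

-- the index range mid+1 .. len maps to the suffix l.drop (m+1)
theorem range_map_eq_drop (l : List Char) (m : Nat) :
    (PySem.List.pyRange ((m : Int) + 1) (l.length : Int) 1).map
        (fun i => PySem.List.pyGetD l i ' ')
      = l.drop (m + 1) := by
  have h := PySem.List.map_pyGetD_pyRange (xs := l) (a := (m : Int) + 1) (d := ' ')
      (by positivity)
  have hlen : PySem.List.len l = (l.length : Int) := rfl
  have htn : ((m : Int) + 1).toNat = m + 1 := by omega
  rw [hlen, htn] at h
  exact h

-- the structural core: for an odd-length list, second half = reverse of first half ↔ palindrome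
theorem pal_core (a d : List Char) (c : Char) (h : a.length = d.length) :
    (d = a.reverse) ↔ (a ++ c :: d = (a ++ c :: d).reverse) := by
  constructor
  · rintro rfl
    simp
  · intro hp
    have hrev : (a ++ c :: d).reverse = d.reverse ++ c :: a.reverse := by simp
    rw [hrev] at hp
    have hinj := List.append_inj hp (by simp [h])
    have h1 : a = d.reverse := hinj.1
    rw [h1]
    simp

theorem drop_eq_reverse_take_iff (l : List Char) (m : Nat) (hlen : l.length = 2 * m + 1) :
    (l.drop (m + 1) = (l.take m).reverse) ↔ l = l.reverse := by
  have hm : m < l.length := by omega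
  obtain ⟨c, hc⟩ : ∃ c, List.drop m l = c :: List.drop (m + 1) l :=
    ⟨l[m], List.drop_eq_getElem_cons hm⟩
  have hsplit : l = l.take m ++ c :: l.drop (m + 1) :=
    (List.take_append_drop m l).symm.trans (by rw [hc])
  have hcore := pal_core (l.take m) (l.drop (m + 1)) c (by simp; omega)
  rw [hcore, ← hsplit]

-- ===== VERDICT (by name: the statement is the Claim_ definition above) =====
theorem accepts_spec : Claim_equal_accepts := by
  intro s _
  unfold Spec_accepts accepts accepts_alt
  set l := s.toList with hl
  simp only []
  by_cases hpar : (l.length : Int) % 2 = 0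
  · -- even length: both sides are false
    have : ¬ ((l.length : Int) % 2 = 1) := by omega
    simp [hpar]
  · -- odd length: l.length = 2 * m + 1
    obtain ⟨m, hm⟩ : ∃ m, l.length = 2 * m + 1 := by
      refine ⟨l.length / 2, ?_⟩
      omega
    have hmid : PySem.Int.floordiv (l.length : Int) 2 = (m : Int) := by
      rw [PySem.Int.floordiv_eq_ediv_of_pos (by omega)]
      omega
    have hpar1 : ((l.length : Int) % 2 == 1) = true := by
      simp; omega
    simp only [hpar, beq_iff_eq, hmid, hpar1, Bool.true_and]
    rw [stack_eq_take l m (by omega), acceptsLoop_eq_isPrefixOf, range_map_eq_drop]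
    have hlen : (l.drop (m + 1)).length = ((l.take m).reverse).length := by
      simp; omega
    by_cases h : l.drop (m + 1) = (l.take m).reverse
    · have hpal : l = l.reverse := (drop_eq_reverse_take_iff l m hm).mp h
      simp [h, List.isPrefixOf_iff_prefix, ← hpal]
    · have hpal : ¬ (l = l.reverse) := fun hp => h ((drop_eq_reverse_take_iff l m hm).mpr hp)
      have hnp : ¬ (l.drop (m + 1) <+: (l.take m).reverse) := fun hp => h (hp.eq_of_length hlen)
      have h1 : (l.drop (m + 1)).isPrefixOf (l.take m).reverse = false := by
        rw [Bool.eq_false_iff]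
        intro ht
        exact hnp (List.isPrefixOf_iff_prefix.mp ht)
      have h2 : (l == l.reverse) = false := by
        rw [Bool.eq_false_iff]
        intro ht
        exact hpal (beq_iff_eq.mp ht)
      rw [h1, h2]
      simp
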